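-- pv_equiv track=rewrite | github.com/open-br/VLM | mft2024_camera.py | extract_vowel
-- ===== SOURCE A (Python) =====
-- def extract_vowel(text):
--   # ローマ字に対応するひらがなの母音と"ん"の辞書
--   hiragana_vowel_and_n_dict = {'a':'あ','i':'い','u':'う','e':'え','o':'お','n':'ん'}
--   hiragana_vowel_dict = hiragana_vowel_and_n_dict.copy()
--   hiragana_vowel_dict.pop('n')
--   vowel_and_n_text = ""
--   word_cnt = 0
--   for word in text:
--     word_cnt += 1
--     if (word in hiragana_vowel_dict) or ((word == 'n') and ((len(text) == word_cnt) or (text[word_cnt] == "'") or (text[word_cnt] not in hiragana_vowel_dict))):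
--     #   vowel_and_n_text += hiragana_vowel_and_n_dict[word]
--       vowel_and_n_text += word
--     else:
--       pass
--   return vowel_and_n_text
-- ===== SOURCE B (Python) =====
-- def extract_vowel(text):
--     # Segment view: split on 'n'; the 'n' ending each segment boundary survives
--     # exactly when the following segment is empty or starts with a non-vowel.
--     vowels = frozenset('aiueo')
--     parts = text.split('n')
--     out = [c for c in parts[0] if c in vowels]
--     for p in parts[1:]:
--         if not p or p[0] not in vowels:
--             out.append('n')
--         out.extend(c for c in p if c in vowels)
--     return ''.join(out)
-- ===== Notes on version B (the rewrite author's own statement) =====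
-- stated objective: alternative
-- what changed: A scans character by character with a 1-based counter and an index lookahead text[word_cnt] plus dict-membership tests; B instead splits the text into segments on 'n' once, emits each boundary 'n' iff the following segment is empty or starts with a non-vowel, and vowel-filters each segment (the redundant apostrophe check disappears).
import Mathlib
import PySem

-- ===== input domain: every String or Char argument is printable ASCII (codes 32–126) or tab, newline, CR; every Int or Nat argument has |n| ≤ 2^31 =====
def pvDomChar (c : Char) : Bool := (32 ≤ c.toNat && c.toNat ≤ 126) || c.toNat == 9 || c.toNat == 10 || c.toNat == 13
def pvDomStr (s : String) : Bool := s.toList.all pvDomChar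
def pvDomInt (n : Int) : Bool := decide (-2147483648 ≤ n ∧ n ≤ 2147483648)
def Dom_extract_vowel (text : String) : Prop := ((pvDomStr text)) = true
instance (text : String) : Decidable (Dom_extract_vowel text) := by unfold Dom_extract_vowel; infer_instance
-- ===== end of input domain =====

-- B replaces A's counter-and-index-lookahead character loop by a staged segment algorithm:
-- split on 'n' once, keep each boundary 'n' iff the next segment is empty or starts with a
-- non-vowel, vowel-filter each segment; objective: alternative decomposition, same cost.

-- ===== PORT A =====
-- loop body of A's for-loop, named as a helper (l is the full char list, st = (acc, word_cnt))
def evStepA (hiragana_vowel_dict : PySem.Dict Char String) (l : List Char)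
    (st : List Char × Int) (word : Char) : List Char × Int :=
  let word_cnt := st.2 + 1
  if hiragana_vowel_dict.contains word ||
     (word == 'n' &&
       (((l.length : Int) == word_cnt) ||
        (PySem.List.pyGet? l word_cnt == some '\'') ||
        !(match PySem.List.pyGet? l word_cnt with
          | some nxt => hiragana_vowel_dict.contains nxt
          | none => true)))   -- none is unreachable: guarded by the length test (Python short-circuit)
  then (st.1 ++ [word], word_cnt)
  else (st.1, word_cnt)

def extract_vowel (text : String) : String :=
  let hiragana_vowel_and_n_dict : PySem.Dict Char String :=
    PySem.Dict.ofList [('a',"あ"),('i',"い"),('u',"う"),('e',"え"),('o',"お"),('n',"ん")]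
  let hiragana_vowel_dict := hiragana_vowel_and_n_dict.erase 'n'
  let l := text.toList
  String.mk (l.foldl (evStepA hiragana_vowel_dict l) ([], 0)).1

-- ===== PORT B =====
def evVowelsB : List Char := ['a','i','u','e','o']

-- "if not p or p[0] not in vowels: out.append('n')" — the chars appended for one segment boundary
def evKeepN (p : List Char) : List Char :=
  if (match p with | [] => true | d :: _ => !evVowelsB.contains d) then ['n'] else []

-- text.split('n') is ported as List.splitOn 'n' on the char list (same semantics for a 1-char sep)
def extract_vowel_alt (text : String) : String :=
  match text.toList.splitOn 'n' with
  | [] => ""   -- unreachable: splitOn never returns []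
  | p0 :: rest =>
    String.mk (rest.foldl
      (fun out p => (out ++ evKeepN p) ++ p.filter (fun c => evVowelsB.contains c))
      (p0.filter (fun c => evVowelsB.contains c)))

-- ===== PRECONDITION & SPEC =====
def Spec_extract_vowel (text : String) (out : String) : Prop := out = extract_vowel_alt text
instance (text : String) (out : String) : Decidable (Spec_extract_vowel text out) := by unfold Spec_extract_vowel; infer_instance

-- ===== CLAIM (what is proved, stated in full; the proofs are below) =====
def Claim_equal_extract_vowel : Prop := ∀ (text : String), Dom_extract_vowel text → Spec_extract_vowel text (extract_vowel text)

-- ===== LEMMAS AND PROOFS =====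

def evKeep (c : Char) (nxt? : Option Char) : Bool :=
  evVowelsB.contains c ||
  (c == 'n' && (match nxt? with
    | none => true
    | some d => d == '\'' || !(evVowelsB.contains d)))

def evSpec : List Char → List Char
  | [] => []
  | c :: rest => (if evKeep c rest.head? then [c] else []) ++ evSpec rest

def evFilt (p : List Char) : List Char := p.filter (fun c => evVowelsB.contains c)

def evG : List (List Char) → List Char
  | [] => []
  | p0 :: rest => evFilt p0 ++ rest.flatMap (fun p => evKeepN p ++ evFilt p)

def evDict : PySem.Dict Char String :=
  (PySem.Dict.ofList [('a',"あ"),('i',"い"),('u',"う"),('e',"え"),('o',"お"),('n',"ん")]).erase 'n'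

lemma evDict_contains (w : Char) : evDict.contains w = evVowelsB.contains w := by
  have h : evDict = PySem.Dict.mk [('a',"あ"),('i',"い"),('u',"う"),('e',"え"),('o',"お")] := by decide
  rw [h]; simp [evVowelsB, BEq.comm, beq_eq_decide]

lemma evFoldA : ∀ (s pre acc : List Char),
    s.foldl (evStepA evDict (pre ++ s)) (acc, (pre.length : Int))
      = (acc ++ evSpec s, ((pre ++ s).length : Int)) := by
  intro s
  induction s with
  | nil => intro pre acc; simp [evSpec]
  | cons c rest ih =>
    intro pre acc
    have hget : PySem.List.pyGet? (pre ++ c :: rest) ((pre.length : Int) + 1)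
        = rest.head? := by
      have := PySem.List.pyGet?_append_right (pre := pre) (ys := c :: rest) (k := 1)
      simpa [← List.head?_eq_getElem?] using this
    have hstep : evStepA evDict (pre ++ c :: rest) (acc, (pre.length : Int)) c
        = (acc ++ (if evKeep c rest.head? then [c] else []), (pre.length : Int) + 1) := by
      simp only [evStepA, evDict_contains, hget, evKeep]
      cases rest with
      | nil =>
        simp
        split_ifs <;> simp
      | cons d rs =>
        simp
        by_cases hd : d = '\''
        · subst hd; simp [evVowelsB]
          split_ifs <;> simp
        · have hne : ¬((rs.length : Int) + 1 = 0) := by omega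
          simp [hd, hne]
          split_ifs <;> simp
    rw [List.foldl_cons, hstep]
    have := ih (pre ++ [c]) (acc ++ (if evKeep c rest.head? then [c] else []))
    simp only [List.append_assoc, List.cons_append, List.nil_append] at this ⊢
    rw [show ((pre ++ [c]).length : Int) = (pre.length : Int) + 1 by simp] at this
    rw [this]
    simp [evSpec]

-- the foldl in port B accumulates exactly evG
lemma evFoldB : ∀ (rest : List (List Char)) (acc : List Char),
    rest.foldl (fun out p => (out ++ evKeepN p) ++ p.filter (fun c => evVowelsB.contains c)) acc
      = acc ++ rest.flatMap (fun p => evKeepN p ++ evFilt p) := by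
  intro rest
  induction rest with
  | nil => intro acc; simp
  | cons p ps ih => intro acc; simp [evFilt, List.flatMap_def]

-- the boundary rule on the next segment equals A's lookahead rule on the next char
lemma evKeepN_head (rest q0 : List Char) (qs : List (List Char))
    (hq : List.splitOnP (fun x => x == 'n') rest = q0 :: qs) :
    evKeepN q0 = (if evKeep 'n' rest.head? then ['n'] else []) := by
  cases rest with
  | nil =>
    rw [List.splitOnP_nil] at hq
    injection hq with h1 _
    subst h1
    simp [evKeepN, evKeep]
  | cons d rs =>
    by_cases hd : d = 'n'
    · subst hd
      rw [List.splitOnP_cons, if_pos (by decide)] at hq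
      injection hq with h1 _
      subst h1
      simp [evKeepN, evKeep, evVowelsB]
    · rw [List.splitOnP_cons, if_neg (by simp [hd])] at hq
      obtain ⟨r0, rs', hr⟩ := List.exists_cons_of_ne_nil (List.splitOnP_ne_nil (fun x => x == 'n') rs)
      rw [hr] at hq
      simp only [List.modifyHead] at hq
      injection hq with h1 _
      subst h1
      by_cases hv : d ∈ evVowelsB
      · fin_cases hv <;> simp [evKeepN, evKeep, evVowelsB]
      · simp only [evVowelsB, List.mem_cons, List.not_mem_nil, or_false, not_or] at hv
        obtain ⟨h1, h2, h3, h4, h5⟩ := hv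
        simp [evKeepN, evKeep, evVowelsB, h1, h2, h3, h4, h5]

lemma evGsplit : ∀ (l : List Char), evG (l.splitOnP (fun x => x == 'n')) = evSpec l := by
  intro l
  induction l with
  | nil => simp [List.splitOnP_nil, evG, evFilt, evSpec]
  | cons c rest ih =>
    obtain ⟨q0, qs, hq⟩ := List.exists_cons_of_ne_nil (List.splitOnP_ne_nil (fun x => x == 'n') rest)
    by_cases hc : c = 'n'
    · subst hc
      rw [List.splitOnP_cons, if_pos (by decide), hq]
      have hhead := evKeepN_head rest q0 qs hq
      rw [hq] at ih
      have h2 : evSpec ('n' :: rest) = (if evKeep 'n' rest.head? then ['n'] else []) ++ evSpec rest := rfl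
      rw [h2, ← hhead, ← ih]
      simp [evG, evFilt]
    · rw [List.splitOnP_cons, if_neg (by simp [hc]), hq]
      simp only [List.modifyHead]
      rw [hq] at ih
      have hkeep : evKeep c rest.head? = evVowelsB.contains c := by
        simp [evKeep, hc]
      have h2 : evSpec (c :: rest) = (if evKeep c rest.head? then [c] else []) ++ evSpec rest := rfl
      rw [h2, hkeep, ← ih]
      simp only [evG, evFilt, List.filter_cons]
      by_cases hv : c ∈ evVowelsB <;> simp [hv]

-- ===== VERDICT (by name: the statement is the Claim_ definition above) =====
theorem extract_vowel_spec : Claim_equal_extract_vowel := by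
  intro text _
  show extract_vowel text = extract_vowel_alt text
  have hA := evFoldA text.toList [] []
  simp only [List.nil_append, List.length_nil, Int.natCast_zero] at hA
  rcases hsp : List.splitOn 'n' text.toList with _ | ⟨q0, qs⟩
  · exact absurd hsp (List.splitOnP_ne_nil (fun x => x == 'n') text.toList)
  · have hG := evGsplit text.toList
    rw [show List.splitOnP (fun x => x == 'n') text.toList = List.splitOn 'n' text.toList from rfl,
      hsp] at hG
    have hAv : extract_vowel text = String.mk (evSpec text.toList) := by
      show String.mk (text.toList.foldl (evStepA evDict text.toList) ([], 0)).1 = _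
      rw [hA]
    have hAlt : extract_vowel_alt text = String.mk (qs.foldl
        (fun out p => (out ++ evKeepN p) ++ p.filter (fun c => evVowelsB.contains c))
        (q0.filter (fun c => evVowelsB.contains c))) := by
      unfold extract_vowel_alt
      rw [hsp]
    rw [hAv, hAlt, evFoldB]
    exact congrArg String.mk hG.symm
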